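-- pv_equiv track=rewrite | github.com/tsuz/flightdeck | sdk/python/flightdeck_sdk/think_consumer_runner.py | _find_compaction_split_index
-- ===== SOURCE A (Python) =====
-- def _find_compaction_split_index(history: list[dict], keep_last: int) -> int:
--     """Find the index where to split history for compaction.
--     Everything before this index is summarized; from this index onward is kept.
--     Returns -1 if nothing to compact."""
--     if not history or keep_last <= 0:
--         return -1
--     total_user = sum(1 for m in history if m.get("role") == "user")
--     if total_user <= keep_last:
--         return -1
--     target = total_user - keep_last
--     seen = 0
--     for i, m in enumerate(history):
--         if m.get("role") == "user":
--             seen += 1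
--             if seen > target:
--                 return i
--     return -1
-- ===== SOURCE B (Python) =====
-- def _find_compaction_split_index(history: list[dict], keep_last: int) -> int:
--     """Single backward pass: the split index is the keep_last-th user message
--     counted from the end, returned only if some user message precedes it."""
--     if not history or keep_last <= 0:
--         return -1
--     cnt = 0
--     candidate = -1
--     for i in range(len(history) - 1, -1, -1):
--         if history[i].get("role") == "user":
--             cnt += 1
--             if cnt == keep_last:
--                 candidate = i
--             elif cnt > keep_last:
--                 return candidate
--     return -1
-- ===== Notes on version B (the rewrite author's own statement) =====
-- stated objective: alternative
-- what changed: Replaces A's two passes (count all user messages, then re-scan forward for the (total-keep_last)-th one) by a single backward scan that records the keep_last-th user message from the end as candidate and returns it as soon as one more user message is found before it.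
import Mathlib
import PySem

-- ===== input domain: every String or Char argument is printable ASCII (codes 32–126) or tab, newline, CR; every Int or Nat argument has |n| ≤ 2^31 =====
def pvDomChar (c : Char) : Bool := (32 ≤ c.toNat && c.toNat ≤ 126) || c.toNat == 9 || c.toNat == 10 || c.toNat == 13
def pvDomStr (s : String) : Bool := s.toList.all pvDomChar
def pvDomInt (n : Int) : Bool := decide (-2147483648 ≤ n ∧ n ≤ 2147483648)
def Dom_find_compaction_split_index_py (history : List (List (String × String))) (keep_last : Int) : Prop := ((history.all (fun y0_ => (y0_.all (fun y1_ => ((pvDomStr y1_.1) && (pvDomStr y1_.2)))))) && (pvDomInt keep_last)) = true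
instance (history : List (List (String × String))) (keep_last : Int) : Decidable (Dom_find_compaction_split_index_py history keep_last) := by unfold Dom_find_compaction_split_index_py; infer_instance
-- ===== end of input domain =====

-- B replaces A's count-then-rescan with a single backward scan (candidate + early exit); same return value everywhere.

-- ===== PORT A =====
-- m.get("role"): first-match lookup in the association list (Python dict has unique keys)
def pvGetRole : List (String × String) → Option String
  | [] => none
  | (k, v) :: rest => if k == "role" then some v else pvGetRole rest

-- the 'for i, m in enumerate(history)' loop of A, with running index i and counter seen
def pvALoop (hist : List (List (String × String))) (i seen target : Int) : Int :=
  match hist with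
  | [] => -1
  | m :: rest =>
    if pvGetRole m = some "user" then
      if seen + 1 > target then i
      else pvALoop rest (i + 1) (seen + 1) target
    else pvALoop rest (i + 1) seen target

def find_compaction_split_index_py (history : List (List (String × String))) (keep_last : Int) : Int :=
  if history = [] ∨ keep_last ≤ 0 then -1
  else
    let total_user : Int :=
      history.foldl (fun acc m => if pvGetRole m = some "user" then acc + 1 else acc) 0
    if total_user ≤ keep_last then -1
    else pvALoop history 0 0 (total_user - keep_last)

-- ===== PORT B =====
-- the 'for i in range(len(history)-1, -1, -1)' loop of B, walking the reversed list with index i counting down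
def pvBLoop (rev : List (List (String × String))) (i cnt candidate keep_last : Int) : Int :=
  match rev with
  | [] => -1
  | m :: rest =>
    if pvGetRole m = some "user" then
      if cnt + 1 = keep_last then pvBLoop rest (i - 1) (cnt + 1) i keep_last
      else if cnt + 1 > keep_last then candidate
      else pvBLoop rest (i - 1) (cnt + 1) candidate keep_last
    else pvBLoop rest (i - 1) cnt candidate keep_last

def find_compaction_split_index_py_alt (history : List (List (String × String))) (keep_last : Int) : Int :=
  if history = [] ∨ keep_last ≤ 0 then -1
  else pvBLoop history.reverse ((history.length : Int) - 1) 0 (-1) keep_last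

-- ===== PRECONDITION & SPEC =====
def Spec_find_compaction_split_index_py (history : List (List (String × String))) (keep_last : Int) (out : Int) : Prop := out = find_compaction_split_index_py_alt history keep_last
instance (history : List (List (String × String))) (keep_last : Int) (out : Int) : Decidable (Spec_find_compaction_split_index_py history keep_last out) := by unfold Spec_find_compaction_split_index_py; infer_instance

-- ===== CLAIM (what is proved, stated in full; the proofs are below) =====
def Claim_equal_find_compaction_split_index_py : Prop := ∀ (history : List (List (String × String))) (keep_last : Int), Dom_find_compaction_split_index_py history keep_last → Spec_find_compaction_split_index_py history keep_last (find_compaction_split_index_py history keep_last)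

-- ===== LEMMAS AND PROOFS =====

-- positions (starting at i, increasing) of the user messages of l
def pvUserPos : List (List (String × String)) → Int → List Int
  | [], _ => []
  | m :: rest, i =>
    if pvGetRole m = some "user" then i :: pvUserPos rest (i + 1) else pvUserPos rest (i + 1)

-- positions (starting at i, decreasing) of the user messages of l
def pvUserPosDown : List (List (String × String)) → Int → List Int
  | [], _ => []
  | m :: rest, i =>
    if pvGetRole m = some "user" then i :: pvUserPosDown rest (i - 1) else pvUserPosDown rest (i - 1)

-- element at index k (k ≤ 0 → head), -1 past the end
def pvPick : List Int → Int → Int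
  | [], _ => -1
  | x :: xs, k => if k ≤ 0 then x else pvPick xs (k - 1)

-- pvBLoop, abstracted to the list of user positions it walks
def pvBChar : List Int → Int → Int → Int → Int
  | [], _, _, _ => -1
  | x :: xs, cnt, candidate, keep =>
    if cnt + 1 = keep then pvBChar xs (cnt + 1) x keep
    else if cnt + 1 > keep then candidate
    else pvBChar xs (cnt + 1) candidate keep

theorem pvUserPos_length (l : List (List (String × String))) : ∀ i : Int,
    (pvUserPos l i).length = (l.filter (fun m => pvGetRole m = some "user")).length := by
  induction l with
  | nil => intro i; rfl
  | cons m rest ih =>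
    intro i
    by_cases h : pvGetRole m = some "user" <;> simp [pvUserPos, h, ih]

theorem pvFoldlCount (l : List (List (String × String))) : ∀ acc : Int,
    l.foldl (fun acc m => if pvGetRole m = some "user" then acc + 1 else acc) acc
      = acc + ((l.filter (fun m => pvGetRole m = some "user")).length : Int) := by
  induction l with
  | nil => intro acc; simp
  | cons m rest ih =>
    intro acc
    have harith : acc + 1 + ((rest.filter (fun m => pvGetRole m = some "user")).length : Int)
        = acc + (((rest.filter (fun m => pvGetRole m = some "user")).length : Int) + 1) := by ring
    by_cases h : pvGetRole m = some "user" <;> simp [List.foldl, h, ih, harith]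

theorem pvUserPosDown_reverse (l : List (List (String × String))) : ∀ i : Int,
    pvUserPosDown l.reverse i = (pvUserPos l (i - l.length + 1)).reverse := by
  induction l with
  | nil => intro i; simp [pvUserPosDown, pvUserPos]
  | cons m rest ih =>
    intro i
    rw [List.reverse_cons]
    have hstep : ∀ (a : List (List (String × String))) (j : Int),
        pvUserPosDown (a ++ [m]) j
          = pvUserPosDown a j
            ++ (if pvGetRole m = some "user" then [j - a.length] else []) := by
      intro a
      induction a with
      | nil =>
        intro j
        by_cases h : pvGetRole m = some "user" <;> simp [pvUserPosDown, h]
      | cons x xs ihx =>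
        intro j
        have harith : j - 1 - (xs.length : Int) = j - ((xs.length : Int) + 1) := by ring
        by_cases h : pvGetRole x = some "user" <;>
          simp [pvUserPosDown, h, ihx, harith]
    rw [hstep, ih]
    have hj : i - ((rest.length : Int) + 1) + 1 + 1 = i - (rest.length : Int) + 1 := by ring
    have hj2 : i - ((rest.length : Int) + 1) + 1 = i - (rest.length : Int) := by ring
    by_cases h : pvGetRole m = some "user" <;> simp [pvUserPos, h, hj2]


theorem pvALoop_char (hist : List (List (String × String))) : ∀ i seen target : Int,
    pvALoop hist i seen target = pvPick (pvUserPos hist i) (target - seen) := by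
  induction hist with
  | nil => intro i seen target; rfl
  | cons m rest ih =>
    intro i seen target
    by_cases h : pvGetRole m = some "user"
    · by_cases hgt : seen + 1 > target
      · simp [pvALoop, pvUserPos, h, hgt, pvPick, show target - seen ≤ 0 by omega]
      · have hne : ¬ target - seen ≤ 0 := by omega
        have harith : target - seen - 1 = target - (seen + 1) := by ring
        simp [pvALoop, pvUserPos, h, hgt, pvPick, hne, ih, harith]
    · simp [pvALoop, pvUserPos, h, ih]

theorem pvBLoop_char (rev : List (List (String × String))) : ∀ i cnt candidate keep : Int,
    pvBLoop rev i cnt candidate keep = pvBChar (pvUserPosDown rev i) cnt candidate keep := by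
  induction rev with
  | nil => intro i cnt candidate keep; rfl
  | cons m rest ih =>
    intro i cnt candidate keep
    by_cases h : pvGetRole m = some "user"
    · simp only [pvBLoop, pvUserPosDown, h, if_pos, pvBChar]
      split_ifs <;> simp [ih]
    · simp [pvBLoop, pvUserPosDown, h, ih]

theorem pvPick_getElem (l : List Int) : ∀ k : Int, 0 ≤ k → ∀ h : k.toNat < l.length,
    pvPick l k = l[k.toNat] := by
  induction l with
  | nil => intro k _ h; simp at h
  | cons x xs ih =>
    intro k hk h
    by_cases h0 : k ≤ 0
    · have : k = 0 := le_antisymm h0 hk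
      subst this; simp [pvPick]
    · have h1 : (1:Int) ≤ k := by omega
      have hkn : k.toNat = (k - 1).toNat + 1 := by omega
      have h' : (k - 1).toNat < xs.length := by
        simp at h; omega
      simp only [pvPick, if_neg h0, ih (k - 1) (by omega) h', hkn]
      simp

theorem pvBChar_lt (V : List Int) : ∀ cnt candidate keep : Int, cnt < keep →
    pvBChar V cnt candidate keep =
      if keep - cnt < (V.length : Int) then pvPick V (keep - cnt - 1) else -1 := by
  induction V with
  | nil => intro cnt candidate keep _; simp [pvBChar, pvPick]
  | cons x xs ih =>
    intro cnt candidate keep hlt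
    by_cases h1 : cnt + 1 = keep
    · -- candidate is set to x; returned iff xs is nonempty
      have hx : ∀ cand, pvBChar xs keep cand keep = if xs = [] then -1 else cand := by
        intro cand
        cases xs with
        | nil => simp [pvBChar]
        | cons y ys =>
          simp only [pvBChar, if_neg (by omega : ¬ keep + 1 = keep),
            if_pos (by omega : keep + 1 > keep)]
          simp
      have hk : keep - cnt = 1 := by omega
      rw [show pvBChar (x :: xs) cnt candidate keep = pvBChar xs (cnt + 1) x keep by
            simp [pvBChar, h1], h1, hx, hk]
      cases xs with
      | nil => simp
      | cons y ys =>
        simp [pvPick]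
    · have h2 : ¬ cnt + 1 > keep := by omega
      have hlt' : cnt + 1 < keep := by omega
      rw [show pvBChar (x :: xs) cnt candidate keep = pvBChar xs (cnt + 1) candidate keep by
            simp [pvBChar, h1, h2], ih (cnt + 1) candidate keep hlt']
      have hk2 : (2:Int) ≤ keep - cnt := by omega
      by_cases hl : keep - (cnt + 1) < (xs.length : Int)
      · rw [if_pos hl, if_pos (by simp only [List.length_cons]; push_cast; omega)]
        have hsplit : pvPick (x :: xs) (keep - cnt - 1) = pvPick xs (keep - cnt - 1 - 1) := by
          simp [pvPick, show ¬ keep - cnt - 1 ≤ 0 by omega]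
        rw [hsplit, show keep - cnt - 1 - 1 = keep - (cnt + 1) - 1 by ring]
      · rw [if_neg hl, if_neg (by simp only [List.length_cons]; push_cast; omega)]

-- ===== VERDICT (by name: the statement is the Claim_ definition above) =====
theorem find_compaction_split_index_py_spec : Claim_equal_find_compaction_split_index_py := by
  intro history keep_last _
  unfold Spec_find_compaction_split_index_py
  unfold find_compaction_split_index_py find_compaction_split_index_py_alt
  by_cases hg : history = [] ∨ keep_last ≤ 0
  · simp [hg]
  · rw [if_neg hg, if_neg hg]
    push Not at hg
    obtain ⟨hne, hk⟩ := hg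
    set U := pvUserPos history 0 with hU
    have htot : history.foldl
        (fun acc m => if pvGetRole m = some "user" then acc + 1 else acc) 0
        = (U.length : Int) := by
      rw [pvFoldlCount, hU, pvUserPos_length]; ring
    have hUlen : U.length = (pvUserPos history 0).length := by rw [hU]
    rw [htot]
    have hB : pvBLoop history.reverse ((history.length : Int) - 1) 0 (-1) keep_last
        = if keep_last < (U.length : Int) then pvPick U.reverse (keep_last - 1) else -1 := by
      rw [pvBLoop_char, pvUserPosDown_reverse,
        show (history.length : Int) - 1 - (history.length : Int) + 1 = 0 by ring, ← hU,
        pvBChar_lt U.reverse 0 (-1) keep_last (by omega)]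
      simp
    rw [hB]
    by_cases hle : (U.length : Int) ≤ keep_last
    · rw [if_pos hle, if_neg (by omega)]
    · rw [if_neg hle, if_pos (by omega)]
      rw [pvALoop_char, ← hU, show (U.length : Int) - keep_last - 0 = (U.length : Int) - keep_last by ring]
      have h1 : (0:Int) ≤ (U.length : Int) - keep_last := by omega
      have h2 : ((U.length : Int) - keep_last).toNat < U.length := by omega
      have h3 : (0:Int) ≤ keep_last - 1 := by omega
      have h4 : (keep_last - 1).toNat < U.reverse.length := by simp; omega
      rw [pvPick_getElem U _ h1 h2, pvPick_getElem U.reverse _ h3 h4]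
      rw [List.getElem_reverse]
      congr 1
      omega
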